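-- pv_equiv track=rewrite | github.com/AymaneNajmi/OCR | src/meal_predictor.py | get_meal_calories
-- ===== SOURCE A (Python) =====
-- def get_meal_calories(meal_name, nutrition_db=None):
--     """
--     Get calories for a meal (placeholder for nutrition database)
--     In production, integrate with actual nutrition DB
--     """
--     if nutrition_db is None:
--         nutrition_db = {}
--
--     # Return calorie value if available, else estimate based on meal type
--     if meal_name in nutrition_db:
--         return nutrition_db[meal_name]
--
--     # Simple heuristic: estimate based on keywords in meal name
--     name_lower = meal_name.lower()
--
--     if any(x in name_lower for x in ['salad', 'salade', 'soup', 'soupe']):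
--         return 200
--     elif any(x in name_lower for x in ['pasta', 'pâte', 'rice', 'riz']):
--         return 350
--     elif any(x in name_lower for x in ['steak', 'meat', 'viande', 'fish', 'poisson']):
--         return 400
--     elif any(x in name_lower for x in ['pizza', 'burger']):
--         return 500
--     elif any(x in name_lower for x in ['cake', 'dessert', 'gâteau']):
--         return 300
--     else:
--         return 250  # Default estimate
-- ===== SOURCE B (Python) =====
-- _KEYWORDS = {
--     'salad': (0, 200), 'salade': (0, 200), 'soup': (0, 200), 'soupe': (0, 200),
--     'pasta': (1, 350), 'p\u00e2te': (1, 350), 'rice': (1, 350), 'riz': (1, 350),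
--     'steak': (2, 400), 'meat': (2, 400), 'viande': (2, 400), 'fish': (2, 400),
--     'poisson': (2, 400),
--     'pizza': (3, 500), 'burger': (3, 500),
--     'cake': (4, 300), 'dessert': (4, 300), 'g\u00e2teau': (4, 300),
-- }
--
--
-- def get_meal_calories(meal_name, nutrition_db=None):
--     if nutrition_db is not None and meal_name in nutrition_db:
--         return nutrition_db[meal_name]
--     name_lower = meal_name.lower()
--     best_p, best_c = 99, 250
--     for kw, (p, c) in _KEYWORDS.items():
--         if p < best_p and kw in name_lower:
--             best_p, best_c = p, c
--     return best_c
-- ===== Notes on version B (the rewrite author's own statement) =====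
-- stated objective: alternative
-- what changed: Replaces A's ordered short-circuit if/elif keyword-group ladder by a single full pass over a flat keyword->(priority,calories) map that keeps a running minimum-priority match (no early exit), defaulting to 250; the DB lookup stays a guard clause.
import Mathlib
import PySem

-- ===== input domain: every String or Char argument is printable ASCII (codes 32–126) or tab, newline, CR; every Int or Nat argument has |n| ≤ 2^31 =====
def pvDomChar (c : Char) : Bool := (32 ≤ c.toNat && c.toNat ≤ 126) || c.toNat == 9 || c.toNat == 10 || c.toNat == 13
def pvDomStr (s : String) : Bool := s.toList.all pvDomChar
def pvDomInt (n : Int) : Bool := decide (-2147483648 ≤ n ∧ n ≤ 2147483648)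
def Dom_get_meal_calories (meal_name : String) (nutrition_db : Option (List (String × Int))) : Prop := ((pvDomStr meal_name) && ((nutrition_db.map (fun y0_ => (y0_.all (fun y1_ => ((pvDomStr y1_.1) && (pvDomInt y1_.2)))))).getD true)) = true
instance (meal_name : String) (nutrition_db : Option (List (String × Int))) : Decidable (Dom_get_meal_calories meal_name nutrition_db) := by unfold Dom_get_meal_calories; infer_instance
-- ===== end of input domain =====

-- B replaces A's ordered short-circuit branch ladder by a single full pass over a flat
-- keyword -> (priority, calories) map keeping a running minimum-priority match (objective: alternative).

-- ===== PORT A =====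
def get_meal_calories (meal_name : String) (nutrition_db : Option (List (String × Int))) : Int :=
  let db : PySem.Dict String Int := PySem.Dict.mk (nutrition_db.getD [])
  match db.get? meal_name with
  | some v => v
  | none =>
    let name_lower := PySem.Str.lower meal_name
    if ["salad", "salade", "soup", "soupe"].any (fun x => PySem.Str.isIn x name_lower) then 200
    else if ["pasta", "pâte", "rice", "riz"].any (fun x => PySem.Str.isIn x name_lower) then 350
    else if ["steak", "meat", "viande", "fish", "poisson"].any (fun x => PySem.Str.isIn x name_lower) then 400
    else if ["pizza", "burger"].any (fun x => PySem.Str.isIn x name_lower) then 500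
    else if ["cake", "dessert", "gâteau"].any (fun x => PySem.Str.isIn x name_lower) then 300
    else 250

-- ===== PORT B =====
-- B-side: flat keyword -> (priority, calories) map, folded once keeping the minimum-priority match
def pvKeywords : List (String × Int × Int) :=
  [ ("salad", 0, 200), ("salade", 0, 200), ("soup", 0, 200), ("soupe", 0, 200)
  , ("pasta", 1, 350), ("pâte", 1, 350), ("rice", 1, 350), ("riz", 1, 350)
  , ("steak", 2, 400), ("meat", 2, 400), ("viande", 2, 400), ("fish", 2, 400)
  , ("poisson", 2, 400)
  , ("pizza", 3, 500), ("burger", 3, 500)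
  , ("cake", 4, 300), ("dessert", 4, 300), ("gâteau", 4, 300) ]

def pvBestMatch (name_lower : String) : Int :=
  (pvKeywords.foldl
    (fun (best : Int × Int) kpc =>
      if decide (kpc.2.1 < best.1) && PySem.Str.isIn kpc.1 name_lower then (kpc.2.1, kpc.2.2) else best)
    (99, 250)).2

def get_meal_calories_alt (meal_name : String) (nutrition_db : Option (List (String × Int))) : Int :=
  match nutrition_db with
  | some db =>
    match (PySem.Dict.mk db).get? meal_name with
    | some v => v
    | none => pvBestMatch (PySem.Str.lower meal_name)
  | none => pvBestMatch (PySem.Str.lower meal_name)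

-- ===== PRECONDITION & SPEC =====
def Spec_get_meal_calories (meal_name : String) (nutrition_db : Option (List (String × Int))) (out : Int) : Prop := out = get_meal_calories_alt meal_name nutrition_db
instance (meal_name : String) (nutrition_db : Option (List (String × Int))) (out : Int) : Decidable (Spec_get_meal_calories meal_name nutrition_db out) := by unfold Spec_get_meal_calories; infer_instance

-- ===== CLAIM (what is proved, stated in full; the proofs are below) =====
def Claim_equal_get_meal_calories : Prop := ∀ (meal_name : String) (nutrition_db : Option (List (String × Int))), Dom_get_meal_calories meal_name nutrition_db → Spec_get_meal_calories meal_name nutrition_db (get_meal_calories meal_name nutrition_db)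

-- ===== LEMMAS AND PROOFS =====
-- Folding one uniform-priority keyword group: the state updates iff the priority improves and some keyword matches.
theorem foldl_group (nl : String) (ks : List String) (p c : Int) (st : Int × Int) :
    List.foldl
      (fun (best : Int × Int) (kpc : String × Int × Int) =>
        if decide (kpc.2.1 < best.1) && PySem.Str.isIn kpc.1 nl then (kpc.2.1, kpc.2.2) else best)
      st (ks.map (fun k => (k, p, c)))
    = if decide (p < st.1) && ks.any (fun k => PySem.Str.isIn k nl) then (p, c) else st := by
  induction ks generalizing st with
  | nil => simp
  | cons k ks ih =>
    simp only [List.map_cons, List.foldl_cons, List.any_cons]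
    by_cases hp : p < st.1
    · by_cases hk : PySem.Str.isIn k nl = true
      · simp only [hp, hk, decide_true, Bool.and_true, if_true, ih, lt_irrefl,
          decide_false, Bool.false_and, Bool.true_or, ite_self]
      · simp only [hp, hk, decide_true, Bool.true_and, Bool.and_false, Bool.false_or, ih]
        simp only [Bool.false_eq_true, if_false]
        rw [decide_eq_true hp, Bool.true_and]
    · simp only [hp, decide_false, Bool.false_and, Bool.false_eq_true, if_false, ih]

theorem pvKeywords_groups :
    pvKeywords =
      (["salad", "salade", "soup", "soupe"].map (fun k => (k, (0 : Int), (200 : Int))))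
      ++ (["pasta", "pâte", "rice", "riz"].map (fun k => (k, (1 : Int), (350 : Int))))
      ++ (["steak", "meat", "viande", "fish", "poisson"].map (fun k => (k, (2 : Int), (400 : Int))))
      ++ (["pizza", "burger"].map (fun k => (k, (3 : Int), (500 : Int))))
      ++ (["cake", "dessert", "gâteau"].map (fun k => (k, (4 : Int), (300 : Int)))) := rfl

theorem ladder_eq_bestMatch (nl : String) :
    (if ["salad", "salade", "soup", "soupe"].any (fun x => PySem.Str.isIn x nl) then (200 : Int)
     else if ["pasta", "pâte", "rice", "riz"].any (fun x => PySem.Str.isIn x nl) then 350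
     else if ["steak", "meat", "viande", "fish", "poisson"].any (fun x => PySem.Str.isIn x nl) then 400
     else if ["pizza", "burger"].any (fun x => PySem.Str.isIn x nl) then 500
     else if ["cake", "dessert", "gâteau"].any (fun x => PySem.Str.isIn x nl) then 300
     else 250)
    = pvBestMatch nl := by
  unfold pvBestMatch
  rw [pvKeywords_groups]
  simp only [List.foldl_append, foldl_group]
  generalize ["salad", "salade", "soup", "soupe"].any (fun x => PySem.Str.isIn x nl) = g1
  generalize ["pasta", "pâte", "rice", "riz"].any (fun x => PySem.Str.isIn x nl) = g2
  generalize ["steak", "meat", "viande", "fish", "poisson"].any (fun x => PySem.Str.isIn x nl) = g3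
  generalize ["pizza", "burger"].any (fun x => PySem.Str.isIn x nl) = g4
  generalize ["cake", "dessert", "gâteau"].any (fun x => PySem.Str.isIn x nl) = g5
  revert g1 g2 g3 g4 g5
  decide

-- ===== VERDICT (by name: the statement is the Claim_ definition above) =====
theorem get_meal_calories_spec : Claim_equal_get_meal_calories := by
  intro meal_name nutrition_db _
  unfold Spec_get_meal_calories get_meal_calories get_meal_calories_alt
  cases nutrition_db with
  | none =>
      simpa using ladder_eq_bestMatch (PySem.Str.lower meal_name)
  | some db =>
      cases h : (PySem.Dict.mk db).get? meal_name with
      | some v => simp [h]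
      | none => simpa [h] using ladder_eq_bestMatch (PySem.Str.lower meal_name)
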